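-- pv_equiv track=rewrite | github.com/isnok/py-flowlib | base/flowtool/python.py | endingwith
-- ===== SOURCE A (Python) =====
-- def endingwith(suffixes='', lst=()):
--     """ Filter an iterable for elements ending with suffix.
--
--         >>> endingwith(('.py', 'xxx', '.sh'), ['something.py', 'somethingelse.sh'])
--         ['something.py', 'somethingelse.sh']
--     """
--     if suffixes == str(suffixes):
--         return [e for e in lst if e.endswith(suffixes)]
--     else:
--         result = []
--         for suffix in suffixes:
--             result.extend(endingwith(suffix, lst))
--         return result
-- ===== SOURCE B (Python) =====
-- def endingwith(suffixes='', lst=()):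
--     """Filter an iterable for elements ending with suffix (stack-based, no recursion)."""
--     result = []
--     stack = [suffixes]
--     while stack:
--         item = stack.pop()
--         if item == str(item):
--             result.extend(e for e in lst if e.endswith(item))
--         else:
--             stack.extend(reversed(item))
--     return result
-- ===== Notes on version B (the rewrite author's own statement) =====
-- stated objective: alternative
-- what changed: Replaces A's recursion over the (possibly nested) suffixes with an explicit stack/worklist loop that pushes children in reverse order, preserving A's pre-order grouping.
import Mathlib
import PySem

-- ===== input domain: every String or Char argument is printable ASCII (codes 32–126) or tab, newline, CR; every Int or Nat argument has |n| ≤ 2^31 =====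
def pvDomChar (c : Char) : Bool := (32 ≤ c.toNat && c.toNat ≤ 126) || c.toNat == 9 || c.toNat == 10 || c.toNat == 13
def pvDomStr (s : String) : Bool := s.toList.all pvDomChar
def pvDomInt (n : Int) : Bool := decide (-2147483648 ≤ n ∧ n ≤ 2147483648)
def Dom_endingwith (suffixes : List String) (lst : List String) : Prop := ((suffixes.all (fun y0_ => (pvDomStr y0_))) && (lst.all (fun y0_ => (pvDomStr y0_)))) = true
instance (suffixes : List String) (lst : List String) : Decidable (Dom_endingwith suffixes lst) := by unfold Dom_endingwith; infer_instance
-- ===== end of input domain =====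

-- B replaces A's recursion over the (possibly nested) suffixes with an explicit stack/worklist
-- loop (children pushed in reverse order); same cost, different decomposition ("alternative").


-- ===== PORT A =====
-- string branch of A: [e for e in lst if e.endswith(suffix)]
def endingwithStr (suffix : String) (lst : List String) : List String :=
  lst.filter (fun e => PySem.Str.endswith e suffix)

-- A with a List String argument takes the else branch: for each suffix (a string),
-- the recursive call lands in the string branch; result.extend(...) is the fold below.
def endingwith (suffixes : List String) (lst : List String) : List String :=
  suffixes.foldl (fun result suffix => result ++ endingwithStr suffix lst) []

-- ===== PORT B =====
-- stack items are either an iterable of suffixes (inl) or a single suffix string (inr)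
def pvWeight : (List String ⊕ String) → Nat
  | Sum.inl l => 2 * l.length + 1
  | Sum.inr _ => 1

-- the while-loop of B: pop the top; a string extends result, a list is pushed back
-- (Python pushes reversed(item) onto the stack end; head of this list = Python's stack top)
def altGo (lst : List String) : List (List String ⊕ String) → List String → List String
  | [], result => result
  | Sum.inl l :: stack, result => altGo lst (l.map Sum.inr ++ stack) result
  | Sum.inr s :: stack, result =>
      altGo lst stack (result ++ lst.filter (fun e => PySem.Str.endswith e s))
termination_by stack => (stack.map pvWeight).sum
decreasing_by
  all_goals simp [pvWeight, List.map_map, Function.comp_def]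
  omega

def endingwith_alt (suffixes : List String) (lst : List String) : List String :=
  altGo lst [Sum.inl suffixes] []

-- ===== PRECONDITION & SPEC =====
def Spec_endingwith (suffixes : List String) (lst : List String) (out : List String) : Prop := out = endingwith_alt suffixes lst
instance (suffixes : List String) (lst : List String) (out : List String) : Decidable (Spec_endingwith suffixes lst out) := by unfold Spec_endingwith; infer_instance

-- ===== CLAIM (what is proved, stated in full; the proofs are below) =====
def Claim_equal_endingwith : Prop := ∀ (suffixes : List String) (lst : List String), Dom_endingwith suffixes lst → Spec_endingwith suffixes lst (endingwith suffixes lst)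

-- ===== LEMMAS AND PROOFS =====
theorem altGo_nil (lst : List String) (result : List String) :
    altGo lst [] result = result := by rw [altGo.eq_def]

theorem altGo_inl (lst : List String) (l : List String)
    (stack : List (List String ⊕ String)) (result : List String) :
    altGo lst (Sum.inl l :: stack) result = altGo lst (l.map Sum.inr ++ stack) result := by
  rw [altGo.eq_def]

theorem altGo_inr (lst : List String) (s : String)
    (stack : List (List String ⊕ String)) (result : List String) :
    altGo lst (Sum.inr s :: stack) result
      = altGo lst stack (result ++ lst.filter (fun e => PySem.Str.endswith e s)) := by
  rw [altGo.eq_def]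

-- running the stack on a block of string items is exactly A's fold over those suffixes
theorem altGo_strings (lst : List String) (l : List String) :
    ∀ (stack : List (List String ⊕ String)) (result : List String),
    altGo lst (l.map Sum.inr ++ stack) result
      = altGo lst stack (l.foldl (fun r s => r ++ lst.filter (fun e => PySem.Str.endswith e s)) result) := by
  induction l with
  | nil => intro stack result; simp
  | cons s t ih =>
      intro stack result
      simp only [List.map_cons, List.cons_append, List.foldl_cons]
      rw [altGo_inr]
      exact ih stack _

-- ===== VERDICT (by name: the statement is the Claim_ definition above) =====
theorem endingwith_spec : Claim_equal_endingwith := by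
  intro suffixes lst _
  show endingwith suffixes lst = endingwith_alt suffixes lst
  unfold endingwith endingwith_alt
  rw [altGo_inl, altGo_strings, altGo_nil]
  simp [endingwithStr]
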